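-- pv_equiv track=rewrite | github.com/andreacorbellini/funkybob | fetch.py | parse_docker_name_generator
-- ===== SOURCE A (Python) =====
-- def parse_docker_name_generator(content):
--     lines = iter(content.split('\n'))
--
--     def iter_strings():
--         for line in lines:
--             if line == '\t}':
--                 break
--             if line.startswith('\t\t"'):
--                 yield line.strip('\t ",')
--
--     names = []
--     adjectives = []
--
--     for line in lines:
--         if line == '\tleft = [...]string{':
--             adjectives += iter_strings()
--         if line == '\tright = [...]string{':
--             names += iter_strings()
--
--     return names, adjectives
-- ===== SOURCE B (Python) =====
-- LEFT = '\tleft = [...]string{'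
-- RIGHT = '\tright = [...]string{'
--
--
-- def _find(lines, start, targets):
--     for k in range(start, len(lines)):
--         if lines[k] in targets:
--             return k
--     return len(lines)
--
--
-- def parse_docker_name_generator(content):
--     lines = content.split('\n')
--     n = len(lines)
--     names = []
--     adjectives = []
--     i = 0
--     while i < n:
--         j = _find(lines, i, (LEFT, RIGHT))
--         if j == n:
--             break
--         e = _find(lines, j + 1, ('\t}',))
--         block = [l.strip('\t ",') for l in lines[j + 1:e] if l.startswith('\t\t"')]
--         if lines[j] == LEFT:
--             adjectives += block
--         else:
--             names += block
--         i = e + 1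
--     return names, adjectives
-- ===== Notes on version B (the rewrite author's own statement) =====
-- stated objective: alternative
-- what changed: Instead of streaming the lines through a shared-iterator/generator state machine, B repeatedly index-searches for the next marker line and for the closing '\t}', and extracts each block's strings in one slice comprehension, advancing an index past the block.
import Mathlib
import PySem

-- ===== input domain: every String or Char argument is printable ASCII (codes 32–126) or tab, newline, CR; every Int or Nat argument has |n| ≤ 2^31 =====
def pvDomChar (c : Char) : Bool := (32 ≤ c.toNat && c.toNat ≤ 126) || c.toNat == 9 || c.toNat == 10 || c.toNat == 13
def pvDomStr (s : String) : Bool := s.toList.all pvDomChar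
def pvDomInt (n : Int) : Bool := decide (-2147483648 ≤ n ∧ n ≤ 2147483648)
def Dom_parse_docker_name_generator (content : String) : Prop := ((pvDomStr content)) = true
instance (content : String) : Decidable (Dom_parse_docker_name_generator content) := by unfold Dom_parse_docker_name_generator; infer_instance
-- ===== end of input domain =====

-- B replaces A's streaming shared-iterator/generator state machine by repeated index
-- searches for the next marker and its closing '\t}' plus a slice comprehension per block;
-- same O(n) cost, a different decomposition ("alternative").

-- ===== PORT A =====
-- the inner generator iter_strings(): consumes lines until '\t}' (or exhaustion),
-- yielding line.strip('\t ",') for lines starting with '\t\t"'; returns (yielded, remaining lines)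
def pvIterStrings (lines : List String) : List String × List String :=
  match lines with
  | [] => ([], [])
  | l :: rest =>
    if l = "\t}" then ([], rest)
    else if PySem.Str.startswith l "\t\t\"" then
      let r := pvIterStrings rest
      (PySem.Str.stripChars l "\t \"," :: r.1, r.2)
    else pvIterStrings rest

theorem pvIterStrings_len (lines : List String) : (pvIterStrings lines).2.length ≤ lines.length := by
  induction lines with
  | nil => simp [pvIterStrings]
  | cons l rest ih =>
    simp only [pvIterStrings]
    split_ifs <;> simp <;> omega

-- the outer for-loop over the shared iterator; both ifs of the Python body are kept in order
def pvOuterA (lines names adjectives : List String) : List String × List String :=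
  match lines with
  | [] => (names, adjectives)
  | line :: rest =>
    if line = "\tleft = [...]string{" then
      let r := pvIterStrings rest
      if line = "\tright = [...]string{" then
        let r2 := pvIterStrings r.2
        pvOuterA r2.2 (names ++ r2.1) (adjectives ++ r.1)
      else pvOuterA r.2 names (adjectives ++ r.1)
    else if line = "\tright = [...]string{" then
      let r := pvIterStrings rest
      pvOuterA r.2 (names ++ r.1) adjectives
    else pvOuterA rest names adjectives
termination_by lines.length
decreasing_by
  · have h1 := pvIterStrings_len rest
    have h2 := pvIterStrings_len (pvIterStrings rest).2
    simp; omega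
  · have h1 := pvIterStrings_len rest
    simp; omega
  · have h1 := pvIterStrings_len rest
    simp; omega
  · simp

def parse_docker_name_generator (content : String) : List String × List String :=
  pvOuterA (((PySem.Str.split? content "\n").getD [])) [] []

-- ===== PORT B =====
-- _find(lines, start, targets): first index k ≥ start with lines[k] in targets, else len(lines)
def pvFind (lines : List String) (targets : List String) (k : Nat) : Nat :=
  if h : k < lines.length then
    if targets.contains lines[k] then k else pvFind lines targets (k + 1)
  else lines.length
termination_by lines.length - k

theorem pvFind_le (lines targets : List String) (k : Nat) :
    pvFind lines targets k ≤ lines.length := by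
  fun_induction pvFind <;> simp_all <;> omega

theorem pvFind_ge (lines targets : List String) (k : Nat) (hk : k ≤ lines.length) :
    k ≤ pvFind lines targets k := by
  fun_induction pvFind <;> omega

-- the while-loop of B over an index i; the slice lines[j+1:e] is ported by hand as
-- drop/take (exact: both indices are nonnegative and e ≤ len(lines)), the block
-- comprehension as filter-then-map
def pvLoopB (lines : List String) (i : Nat) (names adjectives : List String) :
    List String × List String :=
  if hi : i < lines.length then
    let j := pvFind lines ["\tleft = [...]string{", "\tright = [...]string{"] i
    if hj : j = lines.length then (names, adjectives)
    else
      let e := pvFind lines ["\t}"] (j + 1)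
      let block := (((lines.drop (j + 1)).take (e - (j + 1))).filter
          (fun l => PySem.Str.startswith l "\t\t\"")).map
          (fun l => PySem.Str.stripChars l "\t \",")
      if lines.getD j "" = "\tleft = [...]string{" then
        pvLoopB lines (e + 1) names (adjectives ++ block)
      else
        pvLoopB lines (e + 1) (names ++ block) adjectives
  else (names, adjectives)
termination_by lines.length - i
decreasing_by
  all_goals
    have h1 := pvFind_le lines ["\tleft = [...]string{", "\tright = [...]string{"] i
    have h2 := pvFind_ge lines ["\tleft = [...]string{", "\tright = [...]string{"] i (by omega)
    have h3 := pvFind_ge lines ["\t}"]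
      (pvFind lines ["\tleft = [...]string{", "\tright = [...]string{"] i + 1) (by omega)
    omega

def parse_docker_name_generator_alt (content : String) : List String × List String :=
  pvLoopB (((PySem.Str.split? content "\n").getD [])) 0 [] []

-- ===== PRECONDITION & SPEC =====
def Spec_parse_docker_name_generator (content : String) (out : List String × List String) : Prop := out = parse_docker_name_generator_alt content
instance (content : String) (out : List String × List String) : Decidable (Spec_parse_docker_name_generator content out) := by unfold Spec_parse_docker_name_generator; infer_instance

-- ===== CLAIM (what is proved, stated in full; the proofs are below) =====
def Claim_equal_parse_docker_name_generator : Prop := ∀ (content : String), Dom_parse_docker_name_generator content → Spec_parse_docker_name_generator content (parse_docker_name_generator content)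

-- ===== LEMMAS AND PROOFS =====

theorem pvFind_hit (lines targets : List String) (k : Nat) (h : k < lines.length)
    (ht : targets.contains lines[k]) : pvFind lines targets k = k := by
  rw [pvFind]; simp only [h, dif_pos]; rw [if_pos ht]

theorem pvFind_miss (lines targets : List String) (k : Nat) (h : k < lines.length)
    (ht : ¬ targets.contains lines[k] = true) :
    pvFind lines targets k = pvFind lines targets (k + 1) := by
  rw [pvFind]; simp only [h, dif_pos]; rw [if_neg ht]

theorem pvFind_big (lines targets : List String) (k : Nat) (h : lines.length ≤ k) :
    pvFind lines targets k = lines.length := by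
  rw [pvFind]; simp [Nat.not_lt.mpr h]

-- the generator, characterised against index search: its yields are exactly the slice
-- up to the first '\t}' filtered and stripped, and the leftover lines resume after it
theorem pvIter_eq (lines : List String) : ∀ k : Nat,
    pvIterStrings (lines.drop k) =
      ((((lines.drop k).take (pvFind lines ["\t}"] k - k)).filter
          (fun l => PySem.Str.startswith l "\t\t\"")).map
          (fun l => PySem.Str.stripChars l "\t \","),
       lines.drop (pvFind lines ["\t}"] k + 1)) := by
  intro k
  induction hn : lines.length - k using Nat.strong_induction_on generalizing k with
  | _ n ih =>
  by_cases h : k < lines.length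
  · have hcons : lines.drop k = lines[k] :: lines.drop (k + 1) :=
      List.drop_eq_getElem_cons h
    by_cases hb : lines[k] = "\t}"
    · have hf : pvFind lines ["\t}"] k = k := pvFind_hit _ _ _ h (by simp [hb])
      rw [hcons, hf]
      simp [pvIterStrings, hb]
    · have hf : pvFind lines ["\t}"] k = pvFind lines ["\t}"] (k + 1) :=
        pvFind_miss _ _ _ h (by simp [hb])
      have hge : k + 1 ≤ pvFind lines ["\t}"] (k + 1) := pvFind_ge _ _ _ (by omega)
      have ihk := ih (lines.length - (k + 1)) (by omega) (k + 1) rfl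
      have htake : (lines[k] :: lines.drop (k + 1)).take (pvFind lines ["\t}"] k - k)
          = lines[k] :: (lines.drop (k + 1)).take (pvFind lines ["\t}"] (k + 1) - (k + 1)) := by
        rw [hf]
        have : pvFind lines ["\t}"] (k + 1) - k
            = (pvFind lines ["\t}"] (k + 1) - (k + 1)) + 1 := by omega
        rw [this, List.take_succ_cons]
      have hs' : PySem.Chars.startswith lines[k].toList ['\t', '\t', '\"']
          = PySem.Str.startswith lines[k] "\t\t\"" := by
        have htl : ("\t\t\"" : String).toList = ['\t', '\t', '\"'] := by decide
        rw [PySem.Str.startswith, htl]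
      by_cases hs : PySem.Str.startswith lines[k] "\t\t\"" = true
      · rw [hcons,
          show pvIterStrings (lines[k] :: lines.drop (k + 1))
              = (PySem.Str.stripChars lines[k] "\t \"," :: (pvIterStrings (lines.drop (k + 1))).1,
                 (pvIterStrings (lines.drop (k + 1))).2) from by simp [pvIterStrings, hb, hs' ▸ hs]]
        rw [ihk, htake, hf]
        simp [List.filter_cons, hs' ▸ hs]
      · rw [hcons,
          show pvIterStrings (lines[k] :: lines.drop (k + 1))
              = pvIterStrings (lines.drop (k + 1)) from by
            simp [pvIterStrings, hb]
            intro hcontra; exact absurd (hs' ▸ hcontra) hs]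
        rw [ihk, htake, hf]
        simp [List.filter_cons, hs' ▸ hs]
  · have hk : lines.length ≤ k := by omega
    have hf : pvFind lines ["\t}"] k = lines.length := pvFind_big _ _ _ hk
    rw [List.drop_eq_nil_of_le hk, hf, List.drop_eq_nil_of_le (by omega)]
    simp [pvIterStrings]

-- A's outer loop on the remaining lines = B's index loop
theorem pvAB (lines : List String) : ∀ (i : Nat) (ns as : List String),
    pvOuterA (lines.drop i) ns as = pvLoopB lines i ns as := by
  intro i ns as
  induction hn : lines.length - i using Nat.strong_induction_on generalizing i ns as with
  | _ n ih =>
  by_cases h : i < lines.length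
  · have hcons : lines.drop i = lines[i] :: lines.drop (i + 1) :=
      List.drop_eq_getElem_cons h
    have hgetD : lines.getD i "" = lines[i] := by
      rw [List.getD_eq_getElem?_getD, List.getElem?_eq_getElem h, Option.getD_some]
    by_cases hl : lines[i] = "\tleft = [...]string{"
    · -- left marker
      have hj : pvFind lines ["\tleft = [...]string{", "\tright = [...]string{"] i = i :=
        pvFind_hit _ _ _ h (by simp [hl])
      have hge := pvFind_ge lines ["\t}"] (i + 1) (by omega)
      conv_rhs => rw [pvLoopB]
      rw [dif_pos h, hj, dif_neg (show ¬ i = lines.length by omega), hgetD, if_pos hl]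
      rw [hcons, pvOuterA,
        if_pos hl, if_neg (hl ▸ (by decide :
          ¬ ("\tleft = [...]string{" : String) = "\tright = [...]string{"))]
      rw [pvIter_eq lines (i + 1)]
      exact ih (lines.length - (pvFind lines ["\t}"] (i + 1) + 1)) (by omega) _ _ _ rfl
    · by_cases hr : lines[i] = "\tright = [...]string{"
      · -- right marker
        have hj : pvFind lines ["\tleft = [...]string{", "\tright = [...]string{"] i = i :=
          pvFind_hit _ _ _ h (by simp [hr])
        have hge := pvFind_ge lines ["\t}"] (i + 1) (by omega)
        conv_rhs => rw [pvLoopB]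
        rw [dif_pos h, hj, dif_neg (show ¬ i = lines.length by omega), hgetD,
          if_neg (hr ▸ (by decide :
            ¬ ("\tright = [...]string{" : String) = "\tleft = [...]string{"))]
        rw [hcons, pvOuterA, if_neg (fun hc => hl hc), if_pos hr]
        rw [pvIter_eq lines (i + 1)]
        exact ih (lines.length - (pvFind lines ["\t}"] (i + 1) + 1)) (by omega) _ _ _ rfl
      · -- ordinary line: A skips it; B's pvFind skips it too
        have hj : pvFind lines ["\tleft = [...]string{", "\tright = [...]string{"] i
            = pvFind lines ["\tleft = [...]string{", "\tright = [...]string{"] (i + 1) :=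
          pvFind_miss _ _ _ h (by simp [hl, hr])
        rw [hcons, pvOuterA, if_neg (fun hc => hl hc), if_neg (fun hc => hr hc)]
        rw [ih (lines.length - (i + 1)) (by omega) (i + 1) ns as rfl]
        have hle := pvFind_le lines ["\tleft = [...]string{", "\tright = [...]string{"] (i + 1)
        by_cases hend : pvFind lines ["\tleft = [...]string{", "\tright = [...]string{"] (i + 1)
            = lines.length
        · conv_rhs => rw [pvLoopB]
          rw [dif_pos h, hj, dif_pos hend]
          by_cases h1 : i + 1 < lines.length
          · rw [pvLoopB, dif_pos h1, dif_pos hend]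
          · rw [pvLoopB, dif_neg h1]
        · have h1 : i + 1 < lines.length := by
            have hge := pvFind_ge lines ["\tleft = [...]string{", "\tright = [...]string{"] (i + 1)
            by_cases hc : i + 1 ≤ lines.length
            · have := hge hc; omega
            · exact absurd (pvFind_big _ _ _ (by omega)) hend
          conv_rhs => rw [pvLoopB]
          rw [pvLoopB, dif_pos h, dif_pos h1, hj, dif_neg hend]
  · have hk : lines.length ≤ i := by omega
    rw [List.drop_eq_nil_of_le hk, pvLoopB]
    simp [Nat.not_lt.mpr hk, pvOuterA]

-- ===== VERDICT (by name: the statement is the Claim_ definition above) =====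
theorem parse_docker_name_generator_spec : Claim_equal_parse_docker_name_generator := by
  intro content _
  unfold Spec_parse_docker_name_generator parse_docker_name_generator parse_docker_name_generator_alt
  have h := pvAB (((PySem.Str.split? content "\n").getD [])) 0 [] []
  rw [List.drop_zero] at h
  exact h
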